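-- pv_equiv track=rewrite | github.com/dkdeconti/CLEAR-CLIP_chimera-masking | demux_chimeras.py | consolidate_first_last
-- ===== SOURCE A (Python) =====
-- from collections import defaultdict
--
-- def consolidate_first_last(mir_map):
--     '''
--     Chooses which miR align to use for demux.
--     '''
--     consol_first_last = defaultdict(dict)
--     for basename, mirs in mir_map.items():
--         first_cnt = len([mir for mir, stats in mirs.items()
--                          if stats[0] == "first"])
--         last_cnt = len([mir for mir, stats in mirs.items()
--                         if stats[0] == "last"])
--         if first_cnt >= last_cnt:
--             consol_first_last[basename]["first"] = max([s[1]
--                                                         for s in mirs.values()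
--                                                         if s[0] == "first"])
--         else:
--             consol_first_last[basename]["last"] = max([s[1]
--                                                        for s in mirs.values()
--                                                        if s[0] == "last"])
--     return consol_first_last
-- ===== SOURCE B (Python) =====
-- def consolidate_first_last(mir_map):
--     '''
--     Chooses which miR align to use for demux.
--     Sort-then-scan: sort each basename's (tag, score) pairs lexicographically,
--     so the "first" entries form a prefix of the "last" entries; the block ends
--     of the sorted list are the maxima, and the boundary position is the count.
--     '''
--     consol = {}
--     for basename, mirs in mir_map.items():
--         rel = sorted(s for s in mirs.values() if s[0] in ("first", "last"))
--         i = 0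
--         while i < len(rel) and rel[i][0] == "first":
--             i += 1
--         if i >= len(rel) - i:
--             consol[basename] = {"first": rel[i - 1][1]}
--         else:
--             consol[basename] = {"last": rel[-1][1]}
--     return consol
-- ===== Notes on version B (the rewrite author's own statement) =====
-- stated objective: alternative
-- what changed: A decides per basename by counting 'first'/'last' tags with two comprehensions and then takes max() of a filtered score list; B instead sorts each basename's (tag, score) pairs lexicographically so the 'first' entries form a prefix, finds the boundary by a prefix scan, and reads both the majority decision (boundary vs list length) and the maximum (the end of the chosen block) off positions of the sorted list.
import Mathlib
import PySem

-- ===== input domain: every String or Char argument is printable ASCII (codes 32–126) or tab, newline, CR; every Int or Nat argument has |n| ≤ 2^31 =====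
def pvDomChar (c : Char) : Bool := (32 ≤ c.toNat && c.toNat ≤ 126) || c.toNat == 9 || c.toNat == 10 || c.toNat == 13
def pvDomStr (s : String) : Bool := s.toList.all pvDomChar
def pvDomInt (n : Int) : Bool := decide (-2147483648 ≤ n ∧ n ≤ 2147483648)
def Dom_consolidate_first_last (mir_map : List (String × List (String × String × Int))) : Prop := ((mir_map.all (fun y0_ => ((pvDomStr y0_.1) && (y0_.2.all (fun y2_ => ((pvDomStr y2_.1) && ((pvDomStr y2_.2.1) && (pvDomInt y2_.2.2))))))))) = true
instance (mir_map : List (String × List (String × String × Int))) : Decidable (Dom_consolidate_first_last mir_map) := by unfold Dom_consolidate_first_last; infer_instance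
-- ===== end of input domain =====

-- B replaces A's count-then-filter-then-max comprehensions by sort-then-scan: it
-- sorts each basename's (tag, score) pairs, finds the first/last boundary by a
-- prefix scan, and reads both the decision and the maximum off block positions
-- (objective: alternative algorithm; neither version mutates its argument).

-- ===== PORT A =====
-- consol_first_last is a defaultdict(dict): consol[basename][tag] = v reads the inner
-- dict (default empty), sets tag, stores back.  max([]) raises ValueError in Python;
-- Pre_ excludes those inputs, so the `.getD 0` below is never reached inside Pre_.
-- pvStepA is the body of A's `for basename, mirs in mir_map.items()` loop.
def pvStepA (consol : PySem.Dict String (PySem.Dict String Int))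
    (bm : String × List (String × String × Int)) : PySem.Dict String (PySem.Dict String Int) :=
  let basename := bm.1
  let mirs := bm.2
  let first_cnt : Int := ((mirs.filter (fun p => p.2.1 == "first")).map (fun p => p.1)).length
  let last_cnt : Int := ((mirs.filter (fun p => p.2.1 == "last")).map (fun p => p.1)).length
  if first_cnt ≥ last_cnt then
    consol.insert basename ((consol.getD basename PySem.Dict.empty).insert "first"
      ((PySem.List.max? ((mirs.filter (fun p => p.2.1 == "first")).map (fun p => p.2.2)) (fun x => x)).getD 0))
  else
    consol.insert basename ((consol.getD basename PySem.Dict.empty).insert "last"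
      ((PySem.List.max? ((mirs.filter (fun p => p.2.1 == "last")).map (fun p => p.2.2)) (fun x => x)).getD 0))

def consolidate_first_last (mir_map : List (String × List (String × String × Int))) : List (String × List (String × Int)) :=
  ((mir_map.foldl pvStepA PySem.Dict.empty).items).map (fun kv => (kv.1, kv.2.items))

-- tag predicates used by B's port
def pvIsF (s : String × Int) : Bool := s.1 == "first"
def pvFL (s : String × Int) : Bool := s.1 == "first" || s.1 == "last"

-- ===== PORT B =====
-- Python's tuple comparison on ("first"/"last", score) is lexicographic: code-point
-- order on the string, then the int — exactly the Lex order on (tag.toList, score)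
-- (PySem string order lives on List Char), used as the sort key below.
def pvKey (p : String × Int) : Lex (List Char × Int) := toLex (p.1.toList, p.2)

-- pvStepOuterB is the body of B's outer loop: rel = sorted(filtered pairs); the
-- while-loop prefix scan is the takeWhile length; rel[i-1] / rel[-1] are pyGet?
-- (B raises IndexError where the `.getD 0` default would be read — outside Pre_).
def pvStepOuterB (consol : PySem.Dict String (PySem.Dict String Int))
    (bm : String × List (String × String × Int)) : PySem.Dict String (PySem.Dict String Int) :=
  let rel := PySem.List.sorted ((bm.2.map (fun q => q.2)).filter pvFL) pvKey false
  let i : Nat := (rel.takeWhile pvIsF).length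
  if (i : Int) ≥ PySem.List.len rel - (i : Int) then
    consol.insert bm.1 (PySem.Dict.mk [("first", ((PySem.List.pyGet? rel ((i : Int) - 1)).map (fun s => s.2)).getD 0)])
  else
    consol.insert bm.1 (PySem.Dict.mk [("last", ((PySem.List.pyGet? rel (-1)).map (fun s => s.2)).getD 0)])

def consolidate_first_last_alt (mir_map : List (String × List (String × String × Int))) : List (String × List (String × Int)) :=
  ((mir_map.foldl pvStepOuterB PySem.Dict.empty).items).map (fun kv => (kv.1, kv.2.items))

-- ===== PRECONDITION & SPEC =====
-- Pre_ excludes (a) association lists with duplicate outer or inner keys — those do not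
-- represent a Python dict, so behaviour on them is an encoding artefact — and
-- (b) inputs where some basename has no entry tagged "first" or "last", on which
-- Python A raises ValueError (max of an empty sequence; B raises IndexError there).
def Pre_consolidate_first_last (mir_map : List (String × List (String × String × Int))) : Prop :=
  (mir_map.map Prod.fst).Nodup ∧
  ∀ bm ∈ mir_map, (bm.2.map Prod.fst).Nodup ∧ ∃ p ∈ bm.2, p.2.1 = "first" ∨ p.2.1 = "last"
instance (mir_map : List (String × List (String × String × Int))) : Decidable (Pre_consolidate_first_last mir_map) := by unfold Pre_consolidate_first_last; infer_instance

def pvWitness_consolidate_first_last : (List (String × List (String × String × Int))) :=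
  [("b", [("m", ("first", 3)), ("n", ("last", 5)), ("o", ("first", 7))])]

def Spec_consolidate_first_last (mir_map : List (String × List (String × String × Int))) (out : List (String × List (String × Int))) : Prop := out = consolidate_first_last_alt mir_map
instance (mir_map : List (String × List (String × String × Int))) (out : List (String × List (String × Int))) : Decidable (Spec_consolidate_first_last mir_map out) := by unfold Spec_consolidate_first_last; infer_instance

-- ===== CLAIM (what is proved, stated in full; the proofs are below) =====
def Claim_equal_consolidate_first_last : Prop := ∀ (mir_map : List (String × List (String × String × Int))), Dom_consolidate_first_last mir_map → Pre_consolidate_first_last mir_map → Spec_consolidate_first_last mir_map (consolidate_first_last mir_map)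

-- ===== LEMMAS AND PROOFS =====

-- the "last" tag predicate (proofs only)
def pvIsL (s : String × Int) : Bool := s.1 == "last"

theorem pv_key_le_same_tag {a b : String × Int} (h : pvKey a ≤ pvKey b) (ht : a.1 = b.1) :
    a.2 ≤ b.2 := by
  rcases Prod.Lex.le_iff.mp h with h1 | ⟨_, h2⟩
  · simp only [pvKey, ofLex_toLex] at h1
    rw [ht] at h1; exact absurd h1 (lt_irrefl _)
  · simpa [pvKey] using h2

theorem pv_last_not_le_first {a b : String × Int} (ha : a.1 = "last") (hb : b.1 = "first") :
    ¬ (pvKey a ≤ pvKey b) := by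
  intro h
  rcases Prod.Lex.le_iff.mp h with h1 | ⟨h1, _⟩ <;>
    simp only [pvKey, ofLex_toLex] at h1 <;> rw [ha, hb] at h1
  · exact absurd h1 (by decide)
  · exact absurd h1 (by decide)

theorem pv_countP_FL (l : List (String × Int)) :
    l.countP pvFL = l.countP pvIsF + l.countP pvIsL := by
  induction l with
  | nil => rfl
  | cons x t ih =>
    by_cases hf : x.1 = "first"
    · simp [pvFL, pvIsF, pvIsL, hf, ih]; omega
    · by_cases hl : x.1 = "last"
      · simp [pvFL, pvIsF, pvIsL, hl, ih]; omega
      · simp [pvFL, pvIsF, pvIsL, hf, hl, ih]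

theorem pv_takeWhile_len_eq_countP {l : List (String × Int)}
    (hpw : l.Pairwise (fun a b => pvKey a ≤ pvKey b)) (pvfl : ∀ p ∈ l, pvFL p) :
    (l.takeWhile pvIsF).length = l.countP pvIsF := by
  induction l with
  | nil => rfl
  | cons x t ih =>
    rw [List.pairwise_cons] at hpw
    by_cases hf : pvIsF x
    · rw [List.takeWhile_cons_of_pos hf, List.countP_cons_of_pos hf]
      simp [ih hpw.2 (fun p hp => pvfl p (List.mem_cons_of_mem _ hp))]
    · rw [List.takeWhile_cons_of_neg hf, List.countP_cons_of_neg hf]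
      have hx : x.1 = "last" := by
        have := pvfl x List.mem_cons_self
        simp [pvFL, pvIsF] at this hf
        tauto
      have : t.countP pvIsF = 0 := by
        rw [List.countP_eq_zero]
        intro p hp hpf
        have hpf' : p.1 = "first" := by simpa [pvIsF] using hpf
        exact pv_last_not_le_first hx hpf' (hpw.1 p hp)
      simp [this]

theorem pv_no_first_in_drop {l : List (String × Int)}
    (h : l.countP pvIsF = (l.takeWhile pvIsF).length) :
    ∀ p ∈ l.dropWhile pvIsF, ¬ pvIsF p := by
  have hsplit : l = l.takeWhile pvIsF ++ l.dropWhile pvIsF := (List.takeWhile_append_dropWhile).symm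
  have htw : (l.takeWhile pvIsF).countP pvIsF = (l.takeWhile pvIsF).length := by
    rw [List.countP_eq_length]
    exact fun p hp => List.mem_takeWhile_imp hp
  have hc : (l.dropWhile pvIsF).countP pvIsF = 0 := by
    have := congrArg (List.countP pvIsF) hsplit
    rw [List.countP_append, htw] at this
    omega
  rw [List.countP_eq_zero] at hc
  exact hc

theorem pv_max?_eq {S : List Int} {v : Int} (hmem : v ∈ S) (hub : ∀ y ∈ S, y ≤ v) :
    PySem.List.max? S (fun x => x) = some v := by
  cases h : PySem.List.max? S (fun x => x) with
  | none => rw [PySem.List.max?_eq_none_iff] at h; subst h; cases hmem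
  | some x =>
    have hx := PySem.List.max?_mem h
    have hmax := PySem.List.max?_isMax h
    have : x = v := le_antisymm (hub x hx) (hmax v hmem)
    rw [this]

-- the per-basename loop bodies agree when the accumulated dict has no binding yet
theorem pv_inner_eq (consol : PySem.Dict String (PySem.Dict String Int))
    (bm : String × List (String × String × Int))
    (hfresh : consol.get? bm.1 = none) :
    pvStepA consol bm = pvStepOuterB consol bm := by
  have hg : consol.getD bm.1 PySem.Dict.empty = PySem.Dict.empty := by
    simp [PySem.Dict.getD, hfresh]
  unfold pvStepA pvStepOuterB
  dsimp only
  rw [hg]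
  set vs : List (String × Int) := bm.2.map (fun q => q.2) with hvs
  set rel : List (String × Int) := PySem.List.sorted (vs.filter pvFL) pvKey false with hrel
  have hpw : rel.Pairwise (fun a b => pvKey a ≤ pvKey b) := by
    rw [hrel]; exact PySem.List.sorted_pairwise _ _
  have hperm : rel.Perm (vs.filter pvFL) := by
    rw [hrel]; exact PySem.List.sorted_perm _ _ _
  have hphi : ∀ p ∈ rel, pvFL p := fun p hp => List.of_mem_filter (hperm.mem_iff.mp hp)
  have hcF : rel.countP pvIsF = vs.countP pvIsF := by
    rw [hperm.countP_eq, List.countP_filter]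
    apply List.countP_congr; intro a _; simp [pvIsF, pvFL]; tauto
  have hcL : rel.countP pvIsL = vs.countP pvIsL := by
    rw [hperm.countP_eq, List.countP_filter]
    apply List.countP_congr; intro a _; simp [pvIsL, pvFL]; tauto
  have hi : (rel.takeWhile pvIsF).length = vs.countP pvIsF :=
    (pv_takeWhile_len_eq_countP hpw hphi).trans hcF
  have hlen : rel.length = vs.countP pvIsF + vs.countP pvIsL := by
    rw [hperm.length_eq, ← List.countP_eq_length_filter, pv_countP_FL]
  have hdrop : ∀ (j : Nat) (hj : j < rel.length), (rel.takeWhile pvIsF).length ≤ j → ¬ pvIsF rel[j] := by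
    intro j hj hij
    have hsplit : rel = rel.takeWhile pvIsF ++ rel.dropWhile pvIsF :=
      (List.takeWhile_append_dropWhile).symm
    have hj2 : j < (rel.takeWhile pvIsF ++ rel.dropWhile pvIsF).length := by
      rw [← hsplit]; exact hj
    have hgetj : rel[j]'hj = (rel.dropWhile pvIsF)[j - (rel.takeWhile pvIsF).length]'(by
        simp only [List.length_append] at hj2; omega) :=
      (List.getElem_of_eq hsplit hj).trans (List.getElem_append_right hij)
    exact hgetj ▸ pv_no_first_in_drop (hi.trans hcF.symm).symm _ (List.getElem_mem _)
  have haF : ((bm.2.filter (fun p => p.2.1 == "first")).map (fun p => p.1)).length = vs.countP pvIsF := by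
    simp only [List.length_map, ← List.countP_eq_length_filter, hvs, List.countP_map]; rfl
  have haL : ((bm.2.filter (fun p => p.2.1 == "last")).map (fun p => p.1)).length = vs.countP pvIsL := by
    simp only [List.length_map, ← List.countP_eq_length_filter, hvs, List.countP_map]; rfl
  have haFs : ((bm.2.filter (fun p => p.2.1 == "first")).map (fun p => p.2.2)) = (vs.filter pvIsF).map (fun s => s.2) := by
    rw [hvs, List.filter_map, List.map_map]; rfl
  have haLs : ((bm.2.filter (fun p => p.2.1 == "last")).map (fun p => p.2.2)) = (vs.filter pvIsL).map (fun s => s.2) := by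
    rw [hvs, List.filter_map, List.map_map]; rfl
  -- the maximal element of a tag block, read off the sorted list
  have hmax : ∀ (k : Nat) (hk : k < rel.length) (t : String), (rel[k]'hk).1 = t →
      (∀ (j : Nat) (hj : j < rel.length), (rel[j]'hj).1 = t → j ≤ k) →
      PySem.List.max? ((vs.filter (fun s => s.1 == t)).map (fun s => s.2)) (fun x => x) = some (rel[k]'hk).2 := by
    intro k hk t htag hub
    have hkfl : pvFL (rel[k]'hk) := hphi _ (List.getElem_mem hk)
    apply pv_max?_eq
    · have h1 : rel[k]'hk ∈ vs.filter pvFL := hperm.mem_iff.mp (List.getElem_mem hk)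
      exact List.mem_map_of_mem (List.mem_filter.mpr ⟨List.mem_of_mem_filter h1, by simp [htag]⟩)
    · intro y hy
      obtain ⟨p, hp, hpy⟩ := List.mem_map.mp hy
      have hpt : p.1 = t := by simpa using (List.mem_filter.mp hp).2
      have hpfl : p ∈ vs.filter pvFL := by
        refine List.mem_filter.mpr ⟨List.mem_of_mem_filter hp, ?_⟩
        simp only [pvFL] at hkfl ⊢
        rw [hpt, ← htag]; exact hkfl
      obtain ⟨j, hj, hje⟩ := List.mem_iff_getElem.mp (hperm.mem_iff.mpr hpfl)
      have hjk : j ≤ k := hub j hj (by rw [hje]; exact hpt)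
      have hmono := PySem.List.key_sorted_getElem_mono (vs.filter pvFL) pvKey hjk
        (by rw [hrel] at hk; exact hk)
      simp only [← hrel] at hmono
      have hle : (rel[j]'hj).2 ≤ (rel[k]'hk).2 :=
        pv_key_le_same_tag hmono (by rw [hje, hpt, htag])
      rw [← hpy, ← hje]; exact hle
  have hdict : ∀ (t : String) (v : Int),
      PySem.Dict.empty.insert t v = PySem.Dict.mk [(t, v)] := fun t v => rfl
  split_ifs with h1 h2 h2
  · -- both pick "first"
    rw [haFs, haF, haL] at *
    rw [hdict]
    by_cases h0 : vs.countP pvIsF = 0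
    · -- no relevant entries at all (outside Pre_): both sides store the default 0
      have h00 : vs.countP pvIsL = 0 := by omega
      have hnil : rel = [] := List.length_eq_zero_iff.mp (by omega)
      have hFnil : vs.filter pvIsF = [] := by
        rw [List.filter_eq_nil_iff]; intro a ha
        exact (List.countP_eq_zero.mp h0) a ha
      rw [hFnil]
      simp [hnil, PySem.List.pyGet?, PySem.List.pyIdx?, PySem.List.max?]
    · have hkk : vs.countP pvIsF - 1 < rel.length := by omega
      have hidx : ((rel.takeWhile pvIsF).length - 1 : Int) = ((vs.countP pvIsF - 1 : Nat) : Int) := by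
        rw [hi]; omega
      have hget : PySem.List.pyGet? rel (((rel.takeWhile pvIsF).length : Int) - 1)
          = some (rel[vs.countP pvIsF - 1]'hkk) := by
        rw [hidx, PySem.List.pyGet?_natCast, List.getElem?_eq_getElem hkk]
      have hlt : vs.countP pvIsF - 1 < (rel.takeWhile pvIsF).length := by rw [hi]; omega
      have hpref := (List.takeWhile_prefix (p := pvIsF) (l := rel)).getElem hlt
      have htag : (rel[vs.countP pvIsF - 1]'hkk).1 = "first" := by
        have hmemtw := List.mem_takeWhile_imp (List.getElem_mem hlt)
        rw [hpref] at hmemtw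
        simpa [pvIsF] using hmemtw
      have hub : ∀ (j : Nat) (hj : j < rel.length), (rel[j]'hj).1 = "first" → j ≤ vs.countP pvIsF - 1 := by
        intro j hj hjt
        by_contra hcon
        exact (hdrop j hj (by rw [hi]; omega)) (by simp [pvIsF, hjt])
      have hm := hmax (vs.countP pvIsF - 1) hkk "first" htag hub
      rw [show (fun s : String × Int => s.1 == "first") = pvIsF from rfl] at hm
      rw [hm, hget]
      rfl
  · -- A picks "first", B picks "last": impossible
    exfalso
    rw [haF, haL] at h1
    rw [PySem.List.len_eq, hi, hlen] at h2
    push_cast at h1 h2; omega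
  · -- A picks "last", B picks "first": impossible
    exfalso
    rw [haF, haL] at h1
    rw [PySem.List.len_eq, hi, hlen] at h2
    push_cast at h1 h2; omega
  · -- both pick "last"
    rw [haLs, haF, haL] at *
    rw [hdict]
    have hcl1 : 1 ≤ vs.countP pvIsL := by omega
    have hkk : rel.length - 1 < rel.length := by omega
    have hget : PySem.List.pyGet? rel (-1) = some (rel[rel.length - 1]'hkk) := by
      rw [PySem.List.pyGet?_neg_one, List.getLast?_eq_getElem?, List.getElem?_eq_getElem hkk]
    have hnf : ¬ pvIsF (rel[rel.length - 1]'hkk) := hdrop _ hkk (by rw [hi]; omega)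
    have htag : (rel[rel.length - 1]'hkk).1 = "last" := by
      have hfl := hphi _ (List.getElem_mem hkk)
      simp only [pvFL, pvIsF] at hfl hnf
      simpa [hnf] using hfl
    have hub : ∀ (j : Nat) (hj : j < rel.length), (rel[j]'hj).1 = "last" → j ≤ rel.length - 1 := by
      intro j hj _; omega
    have hm := hmax (rel.length - 1) hkk "last" htag hub
    rw [show (fun s : String × Int => s.1 == "last") = pvIsL from rfl] at hm
    rw [hm, hget]
    rfl

theorem pv_fold_eq (mm : List (String × List (String × String × Int)))
    (d : PySem.Dict String (PySem.Dict String Int))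
    (hnd : (mm.map Prod.fst).Nodup)
    (hfresh : ∀ b ∈ mm.map Prod.fst, d.get? b = none) :
    mm.foldl pvStepA d = mm.foldl pvStepOuterB d := by
  induction mm generalizing d with
  | nil => rfl
  | cons bm t ih =>
    simp only [List.map_cons, List.nodup_cons] at hnd
    have hf0 : d.get? bm.1 = none := hfresh bm.1 (by simp)
    simp only [List.foldl_cons, pv_inner_eq d bm hf0]
    refine ih _ hnd.2 ?_
    intro b hb
    have hne : b ≠ bm.1 := fun h => hnd.1 (h ▸ hb)
    unfold pvStepOuterB
    dsimp only
    split <;> rw [PySem.Dict.get?_insert_of_ne _ _ hne] <;> exact hfresh b (by simp [hb])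

-- ===== VERDICT (by name: the statement is the Claim_ definition above) =====
theorem consolidate_first_last_spec : Claim_equal_consolidate_first_last := by
  intro mir_map _hdom hpre
  unfold Spec_consolidate_first_last consolidate_first_last consolidate_first_last_alt
  rw [pv_fold_eq mir_map PySem.Dict.empty hpre.1 (by intro b _; rfl)]
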